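-- pv_equiv track=rewrite | github.com/vidiecan/pyspell | src/pyspell/dic.py | has_affixes
-- ===== SOURCE A (Python) =====
-- import bisect
--
-- def has_affixes(word_ds, affixes):
--     for word_d in word_ds:
--         found = True
--         for aff in affixes:
--             if aff is None:
--                 continue
--             word_affs = word_d["affixes"]
--             #if aff not in word_affs:
--             i = bisect.bisect_left(word_affs, aff)
--             if i == len(word_affs) or word_affs[i] != aff:
--                 found = False
--                 break
--         if found:
--             return True
--     return False
-- ===== SOURCE B (Python) =====
-- def has_affixes(word_ds, affixes):
--     candidates = list(word_ds)
--     for aff in affixes: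
--         if aff is not None:
--             candidates = [w for w in candidates if aff in w["affixes"]]
--     return bool(candidates)
-- ===== Notes on version B (the rewrite author's own statement) =====
-- stated objective: alternative
-- what changed: Inverts the loop nesting: instead of testing each word against every affix with an inner binary-search loop and a found/break flag, B iterates over the affixes, each step filtering the surviving word list by plain membership, and finally returns whether any word survived.
-- outside the precondition, e.g. on has_affixes([{'affixes': ['b', 'a']}], ['a']): A returns False, B returns True; on has_affixes([{'affixes': ['a']}, {}], ['a']): A returns True, B raises KeyError
import Mathlib
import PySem

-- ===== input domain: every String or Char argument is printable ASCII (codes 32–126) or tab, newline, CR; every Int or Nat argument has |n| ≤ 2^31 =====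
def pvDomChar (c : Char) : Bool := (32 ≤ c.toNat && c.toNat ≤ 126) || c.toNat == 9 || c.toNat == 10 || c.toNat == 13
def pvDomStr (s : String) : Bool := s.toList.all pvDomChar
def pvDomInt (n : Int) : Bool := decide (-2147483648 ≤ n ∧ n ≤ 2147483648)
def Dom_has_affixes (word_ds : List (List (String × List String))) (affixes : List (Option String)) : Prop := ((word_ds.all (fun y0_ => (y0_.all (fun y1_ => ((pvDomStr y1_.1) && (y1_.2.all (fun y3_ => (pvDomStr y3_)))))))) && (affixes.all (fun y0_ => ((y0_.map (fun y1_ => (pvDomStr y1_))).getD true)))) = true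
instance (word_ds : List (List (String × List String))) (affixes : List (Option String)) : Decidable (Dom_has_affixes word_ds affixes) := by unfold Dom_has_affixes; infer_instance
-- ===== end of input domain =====

-- B inverts the loop nesting: it iterates over the affixes, filtering the surviving word
-- list at each step, and finally checks whether any word survived — no per-word inner
-- binary-search loop and no found/break flag. Equivalence is claimed on Pre_: sorted affix
-- lists (bisect's contract) and no KeyError.

-- ===== PORT A =====

-- port of bisect.bisect_left(word_affs, aff) (whole-list call: lo=0, hi=len)
def pvBisectLeft (l : List String) (x : String) (lo hi : Nat) : Nat :=
  if lo < hi then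
    let mid := (lo + hi) / 2
    if l.getD mid "" < x then pvBisectLeft l x (mid + 1) hi
    else pvBisectLeft l x lo mid
  else lo
termination_by hi - lo
decreasing_by all_goals omega

-- A's inner 'for aff in affixes' loop with the found flag/break, for one word_d
def pvInnerA (word_d : List (String × List String)) : List (Option String) → Bool
  | [] => true
  | none :: rest => pvInnerA word_d rest
  | some aff :: rest =>
    let word_affs := (PySem.Dict.mk word_d).getD "affixes" []
    let i := pvBisectLeft word_affs aff 0 word_affs.length
    if i = word_affs.length ∨ word_affs.getD i "" ≠ aff then false
    else pvInnerA word_d rest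

def has_affixes (word_ds : List (List (String × List String))) (affixes : List (Option String)) : Bool :=
  match word_ds with
  | [] => false
  | word_d :: rest => if pvInnerA word_d affixes then true else has_affixes rest affixes

-- ===== PORT B =====
-- Source B: candidates = list(word_ds); for aff in affixes: if aff is not None:
--   candidates = [w for w in candidates if aff in w["affixes"]]; return bool(candidates)
def has_affixes_alt (word_ds : List (List (String × List String))) (affixes : List (Option String)) : Bool :=
  let final := affixes.foldl
    (fun candidates o =>
      match o with
      | none => candidates
      | some aff => candidates.filter (fun w => ((PySem.Dict.mk w).getD "affixes" []).contains aff))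
    word_ds
  !final.isEmpty

-- ===== PRECONDITION & SPEC =====
-- Unless every affix is None (then neither program touches the word dicts), Pre_ excludes
-- (a) inputs where some word dict lacks the "affixes" key — there Python raises KeyError
-- (A unless a match is found first, in which case A returns True while B still raises, see
-- cites) — and (b) inputs where some word's affix list is not sorted ascending: there
-- bisect_left's sortedness contract is violated and A's membership answer is an artefact of
-- binary search on unsorted data (see cites; B uses true membership).
def Pre_has_affixes (word_ds : List (List (String × List String))) (affixes : List (Option String)) : Prop :=
  affixes.all Option.isNone = true ∨
    ∀ word_d ∈ word_ds, ((PySem.Dict.mk word_d).get? "affixes").isSome = true ∧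
      (((PySem.Dict.mk word_d).getD "affixes" []).Pairwise (fun a b => a.toList ≤ b.toList) ∨
        affixes.all (fun o =>
          o.all (fun a => !((PySem.Dict.mk word_d).getD "affixes" []).contains a)) = true)
instance (word_ds : List (List (String × List String))) (affixes : List (Option String)) : Decidable (Pre_has_affixes word_ds affixes) := by unfold Pre_has_affixes; infer_instance

def pvWitness_has_affixes : (List (List (String × List String))) × List (Option String) :=
  ([[("affixes", ["a", "b"])], [("affixes", ["b"])]], [some "a", none])

def Spec_has_affixes (word_ds : List (List (String × List String))) (affixes : List (Option String)) (out : Bool) : Prop := out = has_affixes_alt word_ds affixes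
instance (word_ds : List (List (String × List String))) (affixes : List (Option String)) (out : Bool) : Decidable (Spec_has_affixes word_ds affixes out) := by unfold Spec_has_affixes; infer_instance

-- ===== CLAIM (what is proved, stated in full; the proofs are below) =====
def Claim_equal_has_affixes : Prop := ∀ (word_ds : List (List (String × List String))) (affixes : List (Option String)), Dom_has_affixes word_ds affixes → Pre_has_affixes word_ds affixes → Spec_has_affixes word_ds affixes (has_affixes word_ds affixes)

-- ===== LEMMAS AND PROOFS =====

theorem pvBisectLeft_bounds (l : List String) (x : String) (lo hi : Nat) (h : lo ≤ hi) :
    lo ≤ pvBisectLeft l x lo hi ∧ pvBisectLeft l x lo hi ≤ hi := by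
  fun_induction pvBisectLeft l x lo hi with
  | case1 lo hi hlt mid hcmp ih => have := ih (by omega); omega
  | case2 lo hi hlt mid hcmp ih => have := ih (by omega); omega
  | case3 lo hi hge => omega

-- invariant of bisect_left on a sorted segment
theorem pvBisectLeft_inv (l : List String) (x : String)
    (hs : l.Pairwise (· ≤ ·)) (lo hi : Nat) (hlohi : lo ≤ hi) (hhi : hi ≤ l.length)
    (H1 : ∀ j, j < lo → ∀ hj : j < l.length, l[j] < x)
    (H2 : ∀ j, hi ≤ j → ∀ hj : j < l.length, ¬ l[j] < x) :
    (∀ j, j < pvBisectLeft l x lo hi → ∀ hj : j < l.length, l[j] < x) ∧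
    (∀ j, pvBisectLeft l x lo hi ≤ j → ∀ hj : j < l.length, ¬ l[j] < x) := by
  have hpw := List.pairwise_iff_getElem.mp hs
  fun_induction pvBisectLeft l x lo hi with
  | case1 lo hi hlt mid hcmp ih =>
    have hmidlen : mid < l.length := by omega
    have hget : l.getD mid "" = l[mid] := List.getD_eq_getElem l "" hmidlen
    rw [hget] at hcmp
    exact ih (by omega) hhi
      (fun j hj hjl => by
        rcases Nat.lt_or_ge j mid with h' | h'
        · exact lt_of_le_of_lt ((hpw j mid hjl hmidlen h')) hcmp
        · have : j = mid := by omega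
          subst this; exact hcmp)
      H2
  | case2 lo hi hlt mid hcmp ih =>
    have hmidlen : mid < l.length := by omega
    have hget : l.getD mid "" = l[mid] := List.getD_eq_getElem l "" hmidlen
    rw [hget] at hcmp
    exact ih (by omega) (by omega) H1
      (fun j hj hjl hlt' => by
        rcases Nat.lt_or_ge mid j with h' | h'
        · exact hcmp (lt_of_le_of_lt (hpw mid j hmidlen hjl h') hlt')
        · have : j = mid := by omega
          subst this; exact hcmp hlt')
  | case3 lo hi hge => exact ⟨fun j hj hjl => H1 j (by omega) hjl, fun j hj hjl => H2 j (by omega) hjl⟩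

-- A's per-affix bisect test, on a sorted list, is exactly non-membership
theorem pvBisect_test_iff (l : List String) (x : String) (hs : l.Pairwise (· ≤ ·)) :
    (pvBisectLeft l x 0 l.length = l.length ∨ l.getD (pvBisectLeft l x 0 l.length) "" ≠ x)
      ↔ x ∉ l := by
  obtain ⟨-, hub⟩ := pvBisectLeft_bounds l x 0 l.length (Nat.zero_le _)
  obtain ⟨I1, I2⟩ := pvBisectLeft_inv l x hs 0 l.length (Nat.zero_le _) (le_refl _)
    (fun j hj _ => by omega) (fun j hj hjl => by omega)
  set i := pvBisectLeft l x 0 l.length with hi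
  have hpw := List.pairwise_iff_getElem.mp hs
  constructor
  · rintro htest hmem
    obtain ⟨j, hjl, hjx⟩ := List.mem_iff_getElem.mp hmem
    rcases Nat.lt_or_ge j i with h' | h'
    · exact absurd hjx (ne_of_lt (I1 j h' hjl))
    · have hil : i < l.length := by omega
      have hget : l.getD i "" = l[i] := List.getD_eq_getElem l "" hil
      rcases htest with h | h
      · omega
      · rw [hget] at h
        have hle : l[i] ≤ l[j] := by
          rcases Nat.lt_or_ge i j with h'' | h''
          · exact hpw i j hil hjl h''
          · have : i = j := by omega
            subst this; exact le_refl _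
        have := I2 i (le_refl _) hil
        rw [hjx] at hle
        exact h (le_antisymm hle (not_lt.mp this))
  · intro hnm
    by_cases hil : i < l.length
    · right
      intro hx
      rw [List.getD_eq_getElem l "" hil] at hx
      exact hnm (hx ▸ List.getElem_mem hil)
    · left; omega

-- A's inner loop computes "every non-None affix is a member of the word's affix list" whenever
-- that list is sorted, or no queried affix occurs in it at all (then every branch agrees)
theorem pvInnerA_iff (word_d : List (String × List String)) (affixes : List (Option String))
    (hs : ((PySem.Dict.mk word_d).getD "affixes" []).Pairwise (· ≤ ·) ∨
      ∀ a : String, some a ∈ affixes → a ∉ (PySem.Dict.mk word_d).getD "affixes" []) :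
    pvInnerA word_d affixes = true ↔
      ∀ a ∈ affixes.filterMap id, a ∈ (PySem.Dict.mk word_d).getD "affixes" [] := by
  induction affixes with
  | nil => simp [pvInnerA]
  | cons o rest ih =>
    have hs' : ((PySem.Dict.mk word_d).getD "affixes" []).Pairwise (· ≤ ·) ∨
        ∀ a : String, some a ∈ rest → a ∉ (PySem.Dict.mk word_d).getD "affixes" [] :=
      hs.imp id (fun h a ha => h a (List.mem_cons_of_mem _ ha))
    cases o with
    | none => simpa [pvInnerA] using ih hs'
    | some aff =>
      simp only [pvInnerA, List.filterMap_cons, id]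
      split_ifs with htest
      · simp only [false_iff]
        intro h
        have hnm : aff ∉ (PySem.Dict.mk word_d).getD "affixes" [] := by
          rcases hs with hsort | habs
          · exact (pvBisect_test_iff _ aff hsort).mp htest
          · exact habs aff (List.mem_cons_self)
        exact hnm (h aff (List.mem_cons_self))
      · have haff : aff ∈ (PySem.Dict.mk word_d).getD "affixes" [] := by
          rcases hs with hsort | habs
          · by_contra hnm
            exact htest ((pvBisect_test_iff _ aff hsort).mpr hnm)
          · exfalso
            apply htest
            have hnm := habs aff (List.mem_cons_self)
            obtain ⟨-, hub⟩ := pvBisectLeft_bounds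
              ((PySem.Dict.mk word_d).getD "affixes" []) aff 0
              ((PySem.Dict.mk word_d).getD "affixes" []).length (Nat.zero_le _)
            by_cases hlt : pvBisectLeft ((PySem.Dict.mk word_d).getD "affixes" []) aff 0
                ((PySem.Dict.mk word_d).getD "affixes" []).length <
                ((PySem.Dict.mk word_d).getD "affixes" []).length
            · right
              rw [List.getD_eq_getElem _ "" hlt]
              intro hx
              exact hnm (hx ▸ List.getElem_mem hlt)
            · left; omega
        rw [ih hs']
        constructor
        · intro h a ha
          rcases List.mem_cons.mp ha with rfl | ha'
          · exact haff
          · exact h a ha'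
        · intro h a ha
          exact h a (List.mem_cons_of_mem _ ha)

-- the predicate B's staged filter accumulates per surviving word
def pvSurvives (affixes : List (Option String)) (w : List (String × List String)) : Bool :=
  (affixes.filterMap id).all (fun a => ((PySem.Dict.mk w).getD "affixes" []).contains a)

-- B's fold of filters equals one filter by the accumulated predicate
theorem pvFold_eq_filter (affixes : List (Option String)) :
    ∀ ws : List (List (String × List String)),
      affixes.foldl
        (fun candidates o =>
          match o with
          | none => candidates
          | some aff => candidates.filter (fun w => ((PySem.Dict.mk w).getD "affixes" []).contains aff))
        ws = ws.filter (pvSurvives affixes) := by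
  induction affixes with
  | nil =>
    intro ws
    exact (List.filter_eq_self.mpr (fun a _ => by simp [pvSurvives])).symm
  | cons o rest ih =>
    intro ws
    cases o with
    | none => simpa [pvSurvives] using ih ws
    | some aff =>
      simp only [List.foldl_cons, ih, List.filter_filter]
      exact List.filter_congr (fun w _ => by
        simp [pvSurvives, List.all_cons, Bool.and_comm])

theorem pvFilter_isEmpty (p : List (String × List String) → Bool)
    (l : List (List (String × List String))) :
    ((l.filter p).isEmpty = false) ↔ ∃ w ∈ l, p w = true := by
  simp

-- A's outer loop is an existential over words
theorem pvA_iff (word_ds : List (List (String × List String))) (affixes : List (Option String)) :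
    has_affixes word_ds affixes = true ↔ ∃ w ∈ word_ds, pvInnerA w affixes = true := by
  induction word_ds with
  | nil => simp [has_affixes]
  | cons wd rest ih =>
    simp only [has_affixes]
    split_ifs with h
    · simp [h]
    · simp [ih, h]

theorem pvInnerA_none (word_d : List (String × List String)) (affixes : List (Option String))
    (h : affixes.all Option.isNone = true) : pvInnerA word_d affixes = true := by
  induction affixes with
  | nil => rfl
  | cons o rest ih =>
    cases o with
    | none => exact ih (by simpa using h)
    | some aff => simp at h

theorem pvFilterMap_none (affixes : List (Option String))
    (h : affixes.all Option.isNone = true) : affixes.filterMap id = [] := by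
  induction affixes with
  | nil => rfl
  | cons o rest ih =>
    cases o with
    | none => simpa using ih (by simpa using h)
    | some aff => simp at h

-- pointwise: under Pre_'s per-word condition (or all-None affixes) A's inner loop equals B's predicate
theorem pvWord_eq (w : List (String × List String)) (affixes : List (Option String))
    (h : affixes.all Option.isNone = true ∨
      (((PySem.Dict.mk w).getD "affixes" []).Pairwise (· ≤ ·) ∨
        ∀ a : String, some a ∈ affixes → a ∉ (PySem.Dict.mk w).getD "affixes" [])) :
    pvInnerA w affixes = pvSurvives affixes w := by
  rcases h with hnone | hs
  · rw [pvInnerA_none w affixes hnone]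
    simp only [pvSurvives, pvFilterMap_none affixes hnone, List.all_nil]
  · apply Bool.eq_iff_iff.mpr
    rw [pvInnerA_iff w affixes hs]
    unfold pvSurvives
    rw [List.all_eq_true]
    constructor <;> (intro h a ha; simpa using h a ha)

-- ===== VERDICT (by name: the statement is the Claim_ definition above) =====
theorem has_affixes_spec : Claim_equal_has_affixes := by
  intro word_ds affixes _ hpre
  show has_affixes word_ds affixes = has_affixes_alt word_ds affixes
  have hword : ∀ w ∈ word_ds, pvInnerA w affixes = pvSurvives affixes w := by
    intro w hw
    apply pvWord_eq
    rcases hpre with h | h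
    · exact Or.inl h
    · refine Or.inr (((h w hw).2).imp
        (fun hle => hle.imp (fun h' => String.le_iff_toList_le.mpr h'))
        (fun hb a ha hmem => ?_))
      have hthis := List.all_eq_true.mp hb _ ha
      simp only [Option.all_some] at hthis
      exact (by simpa using hthis : a ∉ (PySem.Dict.mk w).getD "affixes" []) hmem
  simp only [has_affixes_alt, pvFold_eq_filter]
  apply Bool.eq_iff_iff.mpr
  rw [pvA_iff, Bool.not_eq_true', pvFilter_isEmpty]
  exact ⟨fun ⟨w, hw, hp⟩ => ⟨w, hw, (hword w hw) ▸ hp⟩,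
    fun ⟨w, hw, hp⟩ => ⟨w, hw, (hword w hw).symm ▸ hp⟩⟩
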